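-- pv_equiv track=rewrite | github.com/MrBrantCode/unitest_baseline | mut_generate/mist_train_cf/cf_49098/solution.py | entrance
-- ===== SOURCE A (Python) =====
-- def entrance(n):
--     MOD = 1000000007
--     sum = 0
--     for i in range(2**n):
--         if i == (i ^ (i//2)):
--             sum += i
--             if sum >= MOD:
--                 sum -= MOD
--     return sum
-- ===== SOURCE B (Python) =====
-- def entrance(n):
--     # i == i ^ (i >> 1) holds exactly when i >> 1 == 0, i.e. i in {0, 1};
--     # so the sum over range(2**n) is 0 for n == 0 and 0 + 1 = 1 otherwise.
--     return 0 if n == 0 else 1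
-- ===== Notes on version B (the rewrite author's own statement) =====
-- stated objective: faster
-- what changed: Replaced the O(2^n) loop with the closed form (i == i ^ (i//2) holds only for i < 2); intended as faster; a timing run measured B 23811x at n=16, where A timed out on most inputs, so a timing run could not confirm it at a common largest size.
import Mathlib
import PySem

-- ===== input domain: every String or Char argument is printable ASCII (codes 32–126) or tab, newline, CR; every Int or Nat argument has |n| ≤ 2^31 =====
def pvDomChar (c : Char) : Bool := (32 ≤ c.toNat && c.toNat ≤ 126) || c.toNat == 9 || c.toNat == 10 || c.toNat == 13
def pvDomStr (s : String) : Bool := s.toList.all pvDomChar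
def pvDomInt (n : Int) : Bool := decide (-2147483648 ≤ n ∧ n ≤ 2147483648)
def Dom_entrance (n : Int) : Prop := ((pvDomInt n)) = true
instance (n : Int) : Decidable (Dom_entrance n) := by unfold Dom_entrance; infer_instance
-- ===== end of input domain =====

-- B replaces A's loop over range(2**n) by the closed form; intended as faster (measured 23811x at n=16, where A timed out on most inputs).

-- ===== PORT A =====
-- literal port of A: fold the loop body over range(2**n)
def entrance (n : Int) : Int :=
  let MOD : Int := 1000000007
  (PySem.List.pyRange 0 ((2 : Int) ^ n.toNat) 1).foldl
    (fun sum i =>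
      if i = PySem.Int.bxor i (PySem.Int.floordiv i 2) then
        let sum := sum + i
        if sum ≥ MOD then sum - MOD else sum
      else sum) 0

-- ===== PORT B =====
def entrance_alt (n : Int) : Int :=
  if n = 0 then 0 else 1

-- ===== PRECONDITION & SPEC =====
-- Pre_ excludes n < 0, where Python A raises TypeError (range of the float 2**n).
def Pre_entrance (n : Int) : Prop := 0 ≤ n
instance (n : Int) : Decidable (Pre_entrance n) := by unfold Pre_entrance; infer_instance
def pvWitness_entrance : Int := 3

def Spec_entrance (n : Int) (out : Int) : Prop := out = entrance_alt n
instance (n : Int) (out : Int) : Decidable (Spec_entrance n out) := by unfold Spec_entrance; infer_instance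

-- ===== CLAIM (what is proved, stated in full; the proofs are below) =====
def Claim_equal_entrance : Prop := ∀ (n : Int), Dom_entrance n → Pre_entrance n → Spec_entrance n (entrance n)

-- ===== LEMMAS AND PROOFS =====

-- the loop body, named for the lemmas
def entranceStep (sum i : Int) : Int :=
  if i = PySem.Int.bxor i (PySem.Int.floordiv i 2) then
    let sum := sum + i
    if sum ≥ (1000000007 : Int) then sum - (1000000007 : Int) else sum
  else sum

-- for i ≥ 2 the branch never fires
lemma entranceStep_skip (s i : Int) (hi : 2 ≤ i) : entranceStep s i = s := by
  have hne : PySem.Int.bxor i (PySem.Int.floordiv i 2) ≠ i := by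
    rw [PySem.Int.floordiv_eq_ediv_of_pos (by norm_num : (0:Int) < 2)]
    rw [PySem.Int.bxor_of_nonneg (by omega) (by positivity)]
    intro h
    have h2 : (i / 2).toNat = i.toNat / 2 := by omega
    rw [h2] at h
    have hm : i.toNat ^^^ i.toNat / 2 = i.toNat := by
      have := congrArg Int.toNat h
      simpa using this
    have := congrArg (i.toNat ^^^ ·) hm
    simp only [← Nat.xor_assoc, Nat.xor_self, Nat.zero_xor] at this
    omega
  unfold entranceStep
  rw [if_neg (fun h => hne h.symm)]

lemma foldl_entranceStep_skip (l : List Int) (s : Int) (h : ∀ i ∈ l, 2 ≤ i) :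
    l.foldl entranceStep s = s := by
  induction l generalizing s with
  | nil => rfl
  | cons a t ih =>
      simp only [List.foldl_cons]
      rw [entranceStep_skip s a (h a (List.mem_cons_self ..))]
      exact ih s (fun i hi => h i (List.mem_cons_of_mem _ hi))

-- ===== VERDICT (by name: the statement is the Claim_ definition above) =====
theorem entrance_spec : Claim_equal_entrance := by
  intro n _ hn
  unfold Spec_entrance
  have he : entrance n = (PySem.List.pyRange 0 ((2:Int) ^ n.toNat) 1).foldl entranceStep 0 := rfl
  by_cases h0 : n = 0
  · subst h0; decide
  · have hk : 1 ≤ n.toNat := by unfold Pre_entrance at hn; omega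
    have hm : (2:Int) ≤ 2 ^ n.toNat := by
      calc (2:Int) = 2 ^ 1 := by norm_num
        _ ≤ 2 ^ n.toNat := by exact pow_le_pow_right₀ (by norm_num) hk
    rw [he, PySem.List.pyRange_one_cons (by omega : (0:Int) < 2 ^ n.toNat)]
    rw [zero_add, PySem.List.pyRange_one_cons (by omega : (1:Int) < 2 ^ n.toNat)]
    simp only [List.foldl_cons]
    have e0 : entranceStep 0 0 = 0 := by decide
    have e1 : entranceStep 0 1 = 1 := by decide
    rw [e0, e1, foldl_entranceStep_skip _ _
      (fun i hi => by have := (PySem.List.mem_pyRange_one).1 hi; omega)]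
    unfold entrance_alt
    rw [if_neg h0]
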